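-- pv_equiv track=rewrite | github.com/daaibraanies/go_game_ai | GO game/new_sly_player.py | bottom_bound_area
-- ===== SOURCE A (Python) =====
-- BOARD_SIZE = 5
--
-- def bottom_bound_area(path):
--     area = set()
--     for vertex in path:
--         vrow, vcol = vertex
--         down_row = vrow + 1
--         while down_row <= (BOARD_SIZE - 1):
--             if (down_row, vcol) not in path:
--                 area.add((down_row, vcol))
--             down_row += 1
--     return area
-- ===== SOURCE B (Python) =====
-- BOARD_SIZE = 5
--
-- def bottom_bound_area(path):
--     path_set = set(path)
--     min_row = {}
--     area = set()
--     for vrow, vcol in path: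
--         prev = min_row.get(vcol, BOARD_SIZE - 1)
--         for r in range(vrow + 1, min(prev, BOARD_SIZE - 1) + 1):
--             if (r, vcol) not in path_set:
--                 area.add((r, vcol))
--         min_row[vcol] = min(min_row.get(vcol, vrow), vrow)
--     return area
-- ===== Notes on version B (the rewrite author's own statement) =====
-- stated objective: alternative
-- what changed: A rescans, for every path vertex, all board rows below it, deduplicating through the result set; B makes one pass keeping a running per-column minimum row in a dict, so for each column only the rows between the new minimum and the previously seen one are visited and each candidate cell is considered at most once.
import Mathlib
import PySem

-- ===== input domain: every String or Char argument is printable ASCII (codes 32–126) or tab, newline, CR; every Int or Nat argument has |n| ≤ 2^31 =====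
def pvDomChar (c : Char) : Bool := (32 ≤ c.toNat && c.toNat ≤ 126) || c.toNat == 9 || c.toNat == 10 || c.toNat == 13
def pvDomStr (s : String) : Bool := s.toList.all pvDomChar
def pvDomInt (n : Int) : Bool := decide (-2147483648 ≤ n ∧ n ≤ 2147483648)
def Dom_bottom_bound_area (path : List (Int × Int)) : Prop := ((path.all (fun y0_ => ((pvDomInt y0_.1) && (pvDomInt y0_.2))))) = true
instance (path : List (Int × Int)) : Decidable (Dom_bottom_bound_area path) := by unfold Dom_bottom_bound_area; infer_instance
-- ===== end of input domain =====

-- B replaces A's per-vertex full column rescans (with set-membership dedup) by a single pass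
-- keeping a running per-column minimum row, visiting each candidate cell at most once; objective: alternative (per-column pass, no dedup lookups).

def pvBOARD_SIZE : Int := 5

-- ===== PORT A =====
-- the inner 'while down_row <= BOARD_SIZE - 1' loop of A, as structural recursion
def pvAWhile (path : List (Int × Int)) (vcol : Int) (area : PySem.Set (Int × Int)) (down_row : Int) :
    PySem.Set (Int × Int) :=
  if h : down_row ≤ pvBOARD_SIZE - 1 then
    pvAWhile path vcol
      (if !(path.contains (down_row, vcol)) then PySem.Set.add area (down_row, vcol) else area)
      (down_row + 1)
  else area
termination_by (pvBOARD_SIZE - down_row).toNat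
decreasing_by simp only [pvBOARD_SIZE] at *; omega

def bottom_bound_area (path : List (Int × Int)) : List (Int × Int) :=
  path.foldl (fun area vertex => pvAWhile path vertex.2 area (vertex.1 + 1)) PySem.Set.empty

-- ===== PORT B =====
def bottom_bound_area_alt (path : List (Int × Int)) : List (Int × Int) :=
  let path_set : PySem.Set (Int × Int) := PySem.Set.ofList path
  let st :=
    path.foldl
      (fun (st : PySem.Dict Int Int × PySem.Set (Int × Int)) v =>
        let prev := st.1.getD v.2 (pvBOARD_SIZE - 1)
        let area :=
          (PySem.List.pyRange (v.1 + 1) (min prev (pvBOARD_SIZE - 1) + 1) 1).foldl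
            (fun area r => if !(PySem.Set.contains path_set (r, v.2)) then PySem.Set.add area (r, v.2) else area)
            st.2
        (st.1.insert v.2 (min (st.1.getD v.2 v.1) v.1), area))
      (PySem.Dict.empty, PySem.Set.empty)
  st.2

-- ===== PRECONDITION & SPEC =====
def Spec_bottom_bound_area (path : List (Int × Int)) (out : List (Int × Int)) : Prop := out = bottom_bound_area_alt path
instance (path : List (Int × Int)) (out : List (Int × Int)) : Decidable (Spec_bottom_bound_area path out) := by unfold Spec_bottom_bound_area; infer_instance

-- ===== CLAIM (what is proved, stated in full; the proofs are below) =====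
def Claim_equal_bottom_bound_area : Prop := ∀ (path : List (Int × Int)), Dom_bottom_bound_area path → Spec_bottom_bound_area path (bottom_bound_area path)

-- ===== LEMMAS AND PROOFS =====

-- A's while loop appends, in increasing row order, the fresh cells below (down_row-1, vcol)
theorem pvAWhile_eq (path : List (Int × Int)) (c : Int) :
    ∀ (n : Nat) (d : Int) (area : PySem.Set (Int × Int)), (5 - d).toNat = n →
      pvAWhile path c area d =
        area ++ ((PySem.List.pyRange d 5 1).filter
            (fun r => !(path.contains (r, c)) && !(area.contains (r, c)))).map (fun r => (r, c)) := by
  intro n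
  induction n with
  | zero =>
    intro d area h
    rw [pvAWhile]
    have hd : ¬ d ≤ pvBOARD_SIZE - 1 := by simp only [pvBOARD_SIZE]; omega
    rw [dif_neg hd, PySem.List.pyRange_one_eq_nil (by omega)]
    simp
  | succ m ih =>
    intro d area h
    rw [pvAWhile]
    by_cases hd : d ≤ pvBOARD_SIZE - 1
    · rw [dif_pos hd]
      simp only [pvBOARD_SIZE] at hd
      rw [PySem.List.pyRange_one_cons (by omega)]
      by_cases hp : path.contains (d, c) = true
      · have hp' : (d, c) ∈ path := by simpa using hp
        rw [if_neg (by simp [hp']), ih (d + 1) area (by omega)]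
        simp [hp']
      · have hp' : (d, c) ∉ path := by simpa using hp
        by_cases ha : area.contains (d, c) = true
        · have ha' : (d, c) ∈ area := by simpa using ha
          rw [if_pos (by simp [hp']),
            show PySem.Set.add area (d, c) = area from by simp [PySem.Set.add, ha'],
            ih (d + 1) area (by omega)]
          simp [hp', ha']
        · have ha' : (d, c) ∉ area := by simpa using ha
          rw [if_pos (by simp [hp']),
            show PySem.Set.add area (d, c) = area ++ [(d, c)] from by simp [PySem.Set.add, ha'],
            ih (d + 1) (area ++ [(d, c)]) (by omega)]
          have hfc : ∀ r ∈ PySem.List.pyRange (d + 1) 5 1,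
              (!(path.contains (r, c)) && !((area ++ [(d, c)]).contains (r, c)))
              = (!(path.contains (r, c)) && !(area.contains (r, c))) := by
            intro r hr
            rw [PySem.List.mem_pyRange_one] at hr
            have hne : (r, c) ≠ (d, c) := by
              intro hEq; cases hEq; omega
            simp [hne]
          rw [List.filter_congr hfc]
          simp [hp', ha', List.append_assoc]
    · rw [dif_neg hd]
      simp only [pvBOARD_SIZE] at hd
      rw [PySem.List.pyRange_one_eq_nil (by omega)]
      simp

-- cutting a filtered range at an upper bound m
theorem pvFilterCut (p : Int → Bool) (m : Int) :
    ∀ (n : Nat) (a : Int), (5 - a).toNat = n →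
      (PySem.List.pyRange a 5 1).filter (fun r => p r && decide (r ≤ m))
        = (PySem.List.pyRange a (min m 4 + 1) 1).filter p := by
  intro n
  induction n with
  | zero =>
    intro a h
    rw [PySem.List.pyRange_one_eq_nil (by omega), PySem.List.pyRange_one_eq_nil (by omega)]
    simp
  | succ k ih =>
    intro a h
    by_cases ha : a ≤ 4
    · rw [PySem.List.pyRange_one_cons (by omega)]
      by_cases ham : a ≤ m
      · rw [PySem.List.pyRange_one_cons (show a < min m 4 + 1 by omega)]
        simp only [List.filter_cons, ham, decide_true, Bool.and_true]
        rw [ih (a + 1) (by omega)]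
      · have hnil : PySem.List.pyRange a (min m 4 + 1) 1 = [] :=
          PySem.List.pyRange_one_eq_nil (by omega)
        simp only [List.filter_cons, ham, decide_false, Bool.and_false, hnil, List.filter_nil]
        rw [ih (a + 1) (by omega), PySem.List.pyRange_one_eq_nil (by omega)]
        simp
    · rw [PySem.List.pyRange_one_eq_nil (by omega), PySem.List.pyRange_one_eq_nil (by omega)]
      simp

-- a set.add loop over fresh, pairwise-distinct rows is an append loop
theorem pvAddFresh (c : Int) (p : Int → Bool) :
    ∀ (l : List Int) (out : PySem.Set (Int × Int)),
      l.Nodup →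
      (∀ r ∈ l, p r = true → (r, c) ∉ out) →
      l.foldl (fun out r => if p r then PySem.Set.add out (r, c) else out) out
        = l.foldl (fun out r => if p r then out ++ [(r, c)] else out) out := by
  intro l
  induction l with
  | nil => intro out _ _; rfl
  | cons r l ih =>
    intro out hnd hfresh
    simp only [List.foldl_cons]
    by_cases hp : p r = true
    · have hout : (r, c) ∉ out := hfresh r (List.mem_cons_self) hp
      rw [if_pos hp, if_pos hp, show PySem.Set.add out (r, c) = out ++ [(r, c)] from by
        simp [PySem.Set.add, hout]]
      refine ih (out ++ [(r, c)]) (List.Nodup.of_cons hnd) ?_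
      intro r' hr' hp'
      have hne : r' ≠ r := fun hEq => (List.nodup_cons.mp hnd).1 (hEq ▸ hr')
      simp [hfresh r' (List.mem_cons_of_mem r hr') hp', hne]
    · rw [if_neg hp, if_neg hp]
      exact ih out (List.Nodup.of_cons hnd) (fun r' hr' => hfresh r' (List.mem_cons_of_mem r hr'))

-- the loop-invariant induction: A's area equals B's out; the dict's min row characterises area
theorem pvMain (path : List (Int × Int)) :
    ∀ (rest : List (Int × Int)) (minRow : PySem.Dict Int Int) (area : List (Int × Int)),
      (∀ r c : Int, (r, c) ∈ area ↔ ((r, c) ∉ path ∧ r ≤ 4 ∧ ∃ m, minRow.get? c = some m ∧ m < r)) →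
      rest.foldl (fun a v => pvAWhile path v.2 a (v.1 + 1)) area
        = (rest.foldl
            (fun (st : PySem.Dict Int Int × List (Int × Int)) v =>
              (st.1.insert v.2 (min (st.1.getD v.2 v.1) v.1),
               (PySem.List.pyRange (v.1 + 1) (min (st.1.getD v.2 (pvBOARD_SIZE - 1)) (pvBOARD_SIZE - 1) + 1) 1).foldl
                 (fun area r => if !(PySem.Set.contains (PySem.Set.ofList path) (r, v.2)) then PySem.Set.add area (r, v.2) else area)
                 st.2))
            (minRow, area)).2 := by
  intro rest
  induction rest with
  | nil => intro minRow area _; rfl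
  | cons v rest ih =>
    intro minRow area hinv
    obtain ⟨vr, c⟩ := v
    simp only [List.foldl_cons]
    -- B's inner loop adds only fresh cells, so it is an append loop
    rw [pvAddFresh c (fun r => !(PySem.Set.contains (PySem.Set.ofList path) (r, c)))
      _ area (PySem.List.nodup_pyRange_one _ _)
      (by
        intro r hr hp hmem
        rw [PySem.List.mem_pyRange_one] at hr
        obtain ⟨hpath, hr4, m, hm, hlt⟩ := (hinv r c).mp hmem
        have hgd : minRow.getD c (pvBOARD_SIZE - 1) = m := by
          rw [PySem.Dict.getD_eq_get?_getD, hm]; rfl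
        rw [hgd] at hr
        simp only [pvBOARD_SIZE] at hr
        omega)]
    -- B's inner loop as append of a filtered map
    rw [PySem.List.foldl_append_if
      (fun r => !(PySem.Set.contains (PySem.Set.ofList path) (r, c))) (fun r => (r, c))]
    have hcontains : ∀ r : Int, (PySem.Set.contains (PySem.Set.ofList path) (r, c))
        = path.contains (r, c) := by
      intro r
      rw [PySem.Set.contains_eq_listContains]
      simp [PySem.Set.mem_ofList]
    -- A's step as append of a filtered map, then show the two appended lists coincide
    have hA := pvAWhile_eq path c (5 - (vr + 1)).toNat (vr + 1) area rfl
    simp only [PySem.Set.contains_eq_listContains] at hA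
    have hnew :
        ((PySem.List.pyRange (vr + 1) 5 1).filter
            (fun r => !(path.contains (r, c)) && !(area.contains (r, c)))).map (fun r => (r, c))
        = ((PySem.List.pyRange (vr + 1) (min (minRow.getD c (pvBOARD_SIZE - 1)) (pvBOARD_SIZE - 1) + 1) 1).filter
            (fun r => !(PySem.Set.contains (PySem.Set.ofList path) (r, c)))).map (fun r => (r, c)) := by
      simp only [pvBOARD_SIZE]
      cases hg : minRow.get? c with
      | none =>
        have hgd : minRow.getD c (5 - 1) = 5 - 1 := by
          rw [PySem.Dict.getD_eq_get?_getD, hg]; rfl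
        rw [hgd]
        have hfc : ∀ r ∈ PySem.List.pyRange (vr + 1) 5 1,
            (!(path.contains (r, c)) && !(area.contains (r, c)))
            = (!(PySem.Set.contains (PySem.Set.ofList path) (r, c))) := by
          intro r _
          have : (r, c) ∉ area := by
            intro hmem
            obtain ⟨_, _, m, hm, _⟩ := (hinv r c).mp hmem
            rw [hg] at hm; simp at hm
          have hac : area.contains (r, c) = false := by
            simpa using this
          rw [hcontains r, hac]
          simp
        rw [List.filter_congr hfc]
        norm_num
      | some m =>
        have hgd : minRow.getD c (5 - 1) = m := by
          rw [PySem.Dict.getD_eq_get?_getD, hg]; rfl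
        rw [hgd]
        have hfc : ∀ r ∈ PySem.List.pyRange (vr + 1) 5 1,
            (!(path.contains (r, c)) && !(area.contains (r, c)))
            = (!(PySem.Set.contains (PySem.Set.ofList path) (r, c)) && decide (r ≤ m)) := by
          intro r hr
          rw [PySem.List.mem_pyRange_one] at hr
          rw [hcontains r]
          by_cases hp : (r, c) ∈ path
          · simp [hp]
          · have hiff : (r, c) ∈ area ↔ m < r := by
              rw [hinv r c, hg]
              constructor
              · rintro ⟨_, _, m', hm', hlt⟩
                cases hm'; omega
              · intro hlt; exact ⟨hp, by omega, m, rfl, hlt⟩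
            by_cases hmr : r ≤ m
            · have hna : (r, c) ∉ area := by rw [hiff]; omega
              simp [hp, hna, hmr]
            · have hya : (r, c) ∈ area := by rw [hiff]; omega
              simp [hp, hya, hmr]
        rw [List.filter_congr hfc]
        rw [pvFilterCut (fun r => !(PySem.Set.contains (PySem.Set.ofList path) (r, c))) m
          (5 - (vr + 1)).toNat (vr + 1) rfl]
        norm_num
    rw [hA, hnew]
    -- apply the IH to the extended state
    apply ih
    -- new invariant
    intro r c'
    simp only [List.mem_append, List.mem_map, List.mem_filter]
    by_cases hc : c' = c
    · subst hc
      rw [PySem.Dict.get?_insert_self]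
      simp only [pvBOARD_SIZE]
      constructor
      · rintro (hmem | ⟨r', ⟨hr', hf⟩, hEq⟩)
        · obtain ⟨hpath, hr4, m, hm, hlt⟩ := (hinv r c').mp hmem
          refine ⟨hpath, hr4, min (minRow.getD c' vr) vr, rfl, ?_⟩
          have : minRow.getD c' vr = m := by
            rw [PySem.Dict.getD_eq_get?_getD, hm]; rfl
          omega
        · cases hEq
          rw [PySem.List.mem_pyRange_one] at hr'
          have hpath : (r, c') ∉ path := by
            have := hf
            rw [hcontains] at this
            simpa using this
          refine ⟨hpath, by omega, min (minRow.getD c' vr) vr, rfl, ?_⟩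
          cases hg : minRow.get? c' with
          | none =>
            have : minRow.getD c' vr = vr := by rw [PySem.Dict.getD_eq_get?_getD, hg]; rfl
            omega
          | some m =>
            have h1 : minRow.getD c' vr = m := by rw [PySem.Dict.getD_eq_get?_getD, hg]; rfl
            have h2 : minRow.getD c' (5 - 1) = m := by rw [PySem.Dict.getD_eq_get?_getD, hg]; rfl
            rw [h2] at hr'
            omega
      · rintro ⟨hpath, hr4, m', hm', hlt⟩
        injection hm' with hm'
        by_cases hold : (r, c') ∈ area
        · exact Or.inl hold
        · right
          refine ⟨r, ⟨?_, ?_⟩, rfl⟩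
          · rw [PySem.List.mem_pyRange_one]
            cases hg : minRow.get? c' with
            | none =>
              have hgd : minRow.getD c' vr = vr := by rw [PySem.Dict.getD_eq_get?_getD, hg]; rfl
              have hgd2 : minRow.getD c' (5 - 1) = 5 - 1 := by
                rw [PySem.Dict.getD_eq_get?_getD, hg]; rfl
              rw [hgd2]
              rw [hgd] at hm'
              omega
            | some m =>
              have hgd : minRow.getD c' vr = m := by rw [PySem.Dict.getD_eq_get?_getD, hg]; rfl
              have hgd2 : minRow.getD c' (5 - 1) = m := by
                rw [PySem.Dict.getD_eq_get?_getD, hg]; rfl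
              rw [hgd2]
              rw [hgd] at hm'
              have hnotm : ¬ (m < r) := by
                intro hmr
                exact hold ((hinv r c').mpr ⟨hpath, hr4, m, hg, hmr⟩)
              omega
          · rw [hcontains]
            simpa using hpath
    · rw [PySem.Dict.get?_insert_of_ne _ _ (by exact hc)]
      constructor
      · rintro (hmem | ⟨r', ⟨_, _⟩, hEq⟩)
        · exact (hinv r c').mp hmem
        · cases hEq; exact absurd rfl hc
      · intro h
        exact Or.inl ((hinv r c').mpr h)

-- ===== VERDICT (by name: the statement is the Claim_ definition above) =====
theorem bottom_bound_area_spec : Claim_equal_bottom_bound_area := by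
  intro path _
  unfold Spec_bottom_bound_area bottom_bound_area bottom_bound_area_alt
  exact pvMain path path PySem.Dict.empty PySem.Set.empty
    (by
      intro r c
      simp only [PySem.Set.empty, List.not_mem_nil, false_iff, PySem.Dict.get?_empty]
      rintro ⟨_, _, m, hm, _⟩
      simp at hm)
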